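-- pv_equiv track=rewrite | github.com/AceSuited/icpc-2022 | 7회차-이분탐색,분할정복/1802번_종이접기.py | solve
-- ===== SOURCE A (Python) =====
-- def solve(case):
--     mid = len(case) // 2
--     if len(case) <= 1:
--         return True
--     else:
--         for i in range(mid):
--             if case[i] == case[len(case) - i - 1]:
--                 return False
--
--         return solve(case[:mid]) and solve(case[mid + 1:])
-- ===== SOURCE B (Python) =====
-- def solve(case):
--     stack = [(0, len(case))]
--     while stack:
--         lo, hi = stack.pop()
--         L = hi - lo
--         if L <= 1:
--             continue
--         m = L // 2
--         for i in range(m):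
--             if case[lo + i] == case[hi - 1 - i]:
--                 return False
--         stack.append((lo, lo + m))
--         stack.append((lo + m + 1, hi))
--     return True
-- ===== Notes on version B (the rewrite author's own statement) =====
-- stated objective: alternative
-- what changed: Replaces A's recursion with slicing (case[:mid], case[mid+1:]) by an explicit stack of (lo, hi) index ranges over the original string, so no substrings are ever materialised.
import Mathlib
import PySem

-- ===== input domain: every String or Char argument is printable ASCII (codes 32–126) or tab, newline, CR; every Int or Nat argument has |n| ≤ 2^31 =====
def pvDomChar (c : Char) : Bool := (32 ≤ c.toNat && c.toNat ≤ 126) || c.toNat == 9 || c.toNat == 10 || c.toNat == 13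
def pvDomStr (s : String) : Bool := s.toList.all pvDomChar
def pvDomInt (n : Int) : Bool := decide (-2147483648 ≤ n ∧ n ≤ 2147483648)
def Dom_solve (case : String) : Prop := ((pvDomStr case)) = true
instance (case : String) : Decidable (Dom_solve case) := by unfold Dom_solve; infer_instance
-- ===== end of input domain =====

-- B replaces A's recursion on string slices by an explicit stack of (lo, hi) index
-- ranges over the original string (alternative decomposition; return value only).

-- ===== PORT A =====
-- A, on the char list: mid = len//2; if len <= 1 return True; for i in range(mid):
-- if case[i] == case[len-i-1]: return False; return solve(case[:mid]) and solve(case[mid+1:]).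
-- The extra Nat argument is fuel that only makes the recursion structural; it is kept
-- at ≥ the list length, where the fuel-exhausted branch is never reached.
def solveAuxA : Nat → List Char → Bool
  | 0, _ => true
  | fuel + 1, l =>
    let mid := l.length / 2
    if l.length ≤ 1 then true
    else
      if (List.range mid).any (fun i => l[i]? == l[l.length - i - 1]?) then false
      else solveAuxA fuel (l.take mid) && solveAuxA fuel (l.drop (mid + 1))

def solve (case : String) : Bool := solveAuxA case.toList.length case.toList

-- ===== PORT B =====
-- Source B's while loop: pop (lo, hi) from the stack top; skip if hi - lo <= 1; compare the
-- mirror pairs in place; push (lo, lo+m) then (lo+m+1, hi) (top of stack = list head).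
-- The Nat argument is fuel making the loop structural; started at ≥ the stack measure
-- sum of (2*(hi-lo)+1), which each iteration strictly decreases, it never runs out.
def solveLoopB (l : List Char) : Nat → List (Nat × Nat) → Bool
  | _, [] => true
  | 0, _ :: _ => true
  | fuel + 1, (lo, hi) :: st =>
    if hi - lo ≤ 1 then solveLoopB l fuel st
    else
      let m := (hi - lo) / 2
      if (List.range m).any (fun i => l[lo + i]? == l[hi - 1 - i]?) then false
      else solveLoopB l fuel ((lo + m + 1, hi) :: (lo, lo + m) :: st)

def solve_alt (case : String) : Bool :=
  solveLoopB case.toList (2 * case.toList.length + 1) [(0, case.toList.length)]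

-- ===== PRECONDITION & SPEC =====
def Spec_solve (case : String) (out : Bool) : Prop := out = solve_alt case
instance (case : String) (out : Bool) : Decidable (Spec_solve case out) := by unfold Spec_solve; infer_instance

-- ===== CLAIM (what is proved, stated in full; the proofs are below) =====
def Claim_equal_solve : Prop := ∀ (case : String), Dom_solve case → Spec_solve case (solve case)

-- ===== LEMMAS AND PROOFS =====

lemma any_range_congr (n : ℕ) (f g : ℕ → Bool) (h : ∀ i, i < n → f i = g i) :
    (List.range n).any f = (List.range n).any g := by
  induction n with
  | zero => rfl
  | succ k ih =>
    simp only [List.range_succ, List.any_append, List.any_cons, List.any_nil]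
    rw [ih (fun i hi => h i (by omega)), h k (by omega)]

-- the fuel does not matter once it reaches the list's length
lemma auxA_fuel (f : ℕ) : ∀ (g : ℕ) (l : List Char), l.length ≤ f → l.length ≤ g →
    solveAuxA f l = solveAuxA g l := by
  induction f with
  | zero =>
    intro g l hf _
    have : l = [] := List.eq_nil_of_length_eq_zero (by omega)
    subst this
    cases g <;> simp [solveAuxA]
  | succ f' ih =>
    intro g l hf hg
    cases g with
    | zero =>
      have : l = [] := List.eq_nil_of_length_eq_zero (by omega)
      subst this
      simp [solveAuxA]
    | succ g' =>
      show solveAuxA (f' + 1) l = solveAuxA (g' + 1) l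
      rw [solveAuxA, solveAuxA]
      by_cases h1 : l.length ≤ 1
      · simp [h1]
      · simp only [if_neg h1]
        split
        · rfl
        · congr 1
          · exact ih _ _ (by simp only [List.length_take]; omega)
              (by simp only [List.length_take]; omega)
          · exact ih _ _ (by simp only [List.length_drop]; omega)
              (by simp only [List.length_drop]; omega)

-- the invariant: with enough fuel the loop returns the conjunction of A's verdict
-- (run with fuel = the range's width) on each pending range
lemma loopB_eq (l : List Char) (f : ℕ) : ∀ (st : List (Nat × Nat)),
    (∀ p ∈ st, p.2 ≤ l.length) →
    (st.map (fun p => 2 * (p.2 - p.1) + 1)).sum ≤ f →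
    solveLoopB l f st = st.all (fun p => solveAuxA (p.2 - p.1) ((l.drop p.1).take (p.2 - p.1))) := by
  induction f with
  | zero =>
    intro st hb hm
    cases st with
    | nil => rfl
    | cons p st' => simp at hm
  | succ f' ih =>
    intro st hb hm
    cases st with
    | nil => rfl
    | cons p st' =>
      obtain ⟨lo, hi⟩ := p
      simp only [List.map_cons, List.sum_cons] at hm
      have hb' : ∀ q ∈ st', q.2 ≤ l.length := fun q hq => hb q (List.mem_cons_of_mem _ hq)
      show solveLoopB l (f' + 1) ((lo, hi) :: st') = _
      rw [solveLoopB]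
      by_cases hle : hi - lo ≤ 1
      · rw [if_pos hle, ih st' hb' (by omega), List.all_cons]
        have : solveAuxA (hi - lo) ((l.drop lo).take (hi - lo)) = true := by
          interval_cases h : hi - lo
          · rfl
          · rw [solveAuxA]
            simp only [List.length_take, List.length_drop]
            rw [if_pos (by omega)]
        rw [this, Bool.true_and]
      · rw [if_neg hle]
        have hhi : hi ≤ l.length := hb (lo, hi) List.mem_cons_self
        have hlen : ((l.drop lo).take (hi - lo)).length = hi - lo := by
          simp only [List.length_take, List.length_drop]; omega
        have hsub : ∀ i, i < hi - lo →
            ((l.drop lo).take (hi - lo))[i]? = l[lo + i]? := by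
          intro i hi'
          rw [List.getElem?_take_of_lt hi', List.getElem?_drop]
        have hanyeq : (List.range ((hi - lo) / 2)).any
              (fun i => ((l.drop lo).take (hi - lo))[i]? == ((l.drop lo).take (hi - lo))[hi - lo - i - 1]?)
            = (List.range ((hi - lo) / 2)).any (fun i => l[lo + i]? == l[hi - 1 - i]?) := by
          apply any_range_congr
          intro i hilt
          rw [hsub i (by omega), hsub _ (by omega)]
          congr 2
          omega
        obtain ⟨g, hg⟩ : ∃ g, hi - lo = g + 1 := ⟨hi - lo - 1, by omega⟩
        have hunfoldA : solveAuxA (hi - lo) ((l.drop lo).take (hi - lo)) =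
            (if (List.range ((hi - lo) / 2)).any (fun i => l[lo + i]? == l[hi - 1 - i]?) then false
             else solveAuxA g (((l.drop lo).take (hi - lo)).take ((hi - lo) / 2)) &&
                  solveAuxA g (((l.drop lo).take (hi - lo)).drop ((hi - lo) / 2 + 1))) := by
          rw [hg, solveAuxA]
          simp only [hlen, hg.symm]
          rw [if_neg (by omega), hanyeq]
        show (if (List.range ((hi - lo) / 2)).any (fun i => l[lo + i]? == l[hi - 1 - i]?) then false
              else solveLoopB l f'
                ((lo + (hi - lo) / 2 + 1, hi) :: (lo, lo + (hi - lo) / 2) :: st')) = _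
        simp only [List.all_cons]
        by_cases hany : ((List.range ((hi - lo) / 2)).any (fun i => l[lo + i]? == l[hi - 1 - i]?)) = true
        · -- a mirror pair matched: both sides are false on the range (lo, hi)
          rw [if_pos hany, hunfoldA, if_pos hany, Bool.false_and]
        · rw [if_neg hany, ih _ ?bnd ?msr, hunfoldA, if_neg hany]
          case bnd =>
            intro q hq
            simp only [List.mem_cons] at hq
            rcases hq with h | h | h
            · subst h; exact hhi
            · subst h; show lo + (hi - lo) / 2 ≤ l.length; omega
            · exact hb' q h
          case msr =>
            simp only [List.map_cons, List.sum_cons]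
            omega
          have e1 : ((l.drop lo).take (hi - lo)).take ((hi - lo) / 2) =
              (l.drop lo).take (lo + (hi - lo) / 2 - lo) := by
            rw [List.take_take]
            congr 1
            omega
          have e2 : ((l.drop lo).take (hi - lo)).drop ((hi - lo) / 2 + 1) =
              (l.drop (lo + (hi - lo) / 2 + 1)).take (hi - (lo + (hi - lo) / 2 + 1)) := by
            rw [List.drop_take, List.drop_drop]
            have h2 : hi - lo - ((hi - lo) / 2 + 1) = hi - (lo + (hi - lo) / 2 + 1) := by omega
            have h3 : lo + ((hi - lo) / 2 + 1) = lo + (hi - lo) / 2 + 1 := by omega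
            rw [h2, h3]
          rw [e1, e2,
              auxA_fuel g (lo + (hi - lo) / 2 - lo) _
                (by simp only [List.length_take, List.length_drop]; omega)
                (by simp only [List.length_take, List.length_drop]; omega),
              auxA_fuel g (hi - (lo + (hi - lo) / 2 + 1)) _
                (by simp only [List.length_take, List.length_drop]; omega)
                (by simp only [List.length_take, List.length_drop]; omega)]
          simp only [List.all_cons]
          simp [Bool.and_assoc, Bool.and_left_comm]

-- ===== VERDICT (by name: the statement is the Claim_ definition above) =====
theorem solve_spec : Claim_equal_solve := by
  intro case _
  show solve case = solve_alt case
  unfold solve solve_alt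
  rw [loopB_eq _ _ _ (by intro p hp; simp_all) (by simp)]
  simp only [List.all_cons, List.all_nil, Nat.sub_zero, List.drop_zero, List.take_length,
    Bool.and_true]
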